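-- pv_equiv track=rewrite | github.com/kaihaan/spending | backend/mcp/pattern_utils.py | parse_pattern_with_prefix
-- ===== SOURCE A (Python) =====
-- def parse_pattern_with_prefix(pattern: str) -> tuple[str, str]:
--     """
--     Parse explicit prefix pattern syntax.
--
--     Supported prefixes:
--         - starts:PATTERN   → ("PATTERN", "starts_with")
--         - contains:PATTERN → ("PATTERN", "contains")
--         - exact:PATTERN    → ("PATTERN", "exact")
--         - regex:PATTERN    → ("PATTERN", "regex")
--         - PATTERN          → ("PATTERN", "contains")  # default
--
--     Args:
--         pattern: Pattern string with optional prefix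
--
--     Returns:
--         Tuple of (cleaned_pattern, pattern_type)
--
--     Examples:
--         >>> parse_pattern_with_prefix("starts:AMAZON")
--         ("AMAZON", "starts_with")
--         >>> parse_pattern_with_prefix("contains:COFFEE")
--         ("COFFEE", "contains")
--         >>> parse_pattern_with_prefix("exact:TESCO")
--         ("TESCO", "exact")
--         >>> parse_pattern_with_prefix("regex:^AMZN.*")
--         ("^AMZN.*", "regex")
--         >>> parse_pattern_with_prefix("UBER")
--         ("UBER", "contains")
--     """
--     if not pattern:
--         return ("", "contains")
--
--     pattern = pattern.strip()
--
--     # Check for explicit prefixes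
--     prefix_map = {
--         "starts:": "starts_with",
--         "contains:": "contains",
--         "exact:": "exact",
--         "regex:": "regex",
--     }
--
--     for prefix, pattern_type in prefix_map.items():
--         if pattern.lower().startswith(prefix):
--             cleaned = pattern[len(prefix) :].strip()
--             return (cleaned, pattern_type)
--
--     # Default to contains
--     return (pattern, "contains")
-- ===== SOURCE B (Python) =====
-- def parse_pattern_with_prefix(pattern: str) -> tuple[str, str]:
--     """Split once at the first ':' instead of scanning prefix candidates."""
--     if not pattern:
--         return ("", "contains")
--
--     pattern = pattern.strip()
--
--     head, sep, rest = pattern.partition(":")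
--     type_map = {
--         "starts": "starts_with",
--         "contains": "contains",
--         "exact": "exact",
--         "regex": "regex",
--     }
--     if sep and head.lower() in type_map:
--         return (rest.strip(), type_map[head.lower()])
--
--     return (pattern, "contains")
-- ===== Notes on version B (the rewrite author's own statement) =====
-- stated objective: idiomatic
-- what changed: B eliminates A's loop over four candidate prefixes (each doing lower+startswith+slice) in favour of a single partition at the first ':' followed by one lookup of the lowercased head in a name-to-type map.
import Mathlib
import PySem

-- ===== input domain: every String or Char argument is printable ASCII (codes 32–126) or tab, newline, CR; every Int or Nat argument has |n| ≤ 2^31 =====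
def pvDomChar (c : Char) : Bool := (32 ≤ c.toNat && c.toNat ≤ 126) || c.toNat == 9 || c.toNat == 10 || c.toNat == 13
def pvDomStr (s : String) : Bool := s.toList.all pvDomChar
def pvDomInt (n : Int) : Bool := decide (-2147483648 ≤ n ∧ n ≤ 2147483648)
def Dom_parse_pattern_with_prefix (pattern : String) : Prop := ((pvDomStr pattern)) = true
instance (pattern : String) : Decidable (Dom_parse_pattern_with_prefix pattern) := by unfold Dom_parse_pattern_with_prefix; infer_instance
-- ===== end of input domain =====

-- B replaces A's candidate-prefix scan by a single partition at the first ':' plus one map lookup (idiomatic; same cost).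

-- ===== PORT A =====
-- the 'for prefix, pattern_type in prefix_map.items()' loop
def pvPrefixLoopA (p : String) : List (String × String) → String × String
  | [] => (p, "contains")
  | (pre, ty) :: rest =>
    if PySem.Str.startswith (PySem.Str.lower p) pre then
      (PySem.Str.strip (PySem.Str.slice p (some (PySem.Str.len pre)) none), ty)
    else pvPrefixLoopA p rest

def parse_pattern_with_prefix (pattern : String) : String × String :=
  if pattern == "" then ("", "contains")
  else
    let p := PySem.Str.strip pattern
    pvPrefixLoopA p
      [("starts:", "starts_with"), ("contains:", "contains"),
       ("exact:", "exact"), ("regex:", "regex")]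

-- ===== PORT B =====
-- hand port of str.partition(":") (PySem has no partition): split at the FIRST ':';
-- none = separator absent (Python's ('s','','')); exact on all inputs.
def pvPartitionColon : List Char → Option (List Char × List Char)
  | [] => none
  | c :: cs =>
    if c = ':' then some ([], cs)
    else
      match pvPartitionColon cs with
      | none => none
      | some (h, r) => some (c :: h, r)

def parse_pattern_with_prefix_alt (pattern : String) : String × String :=
  if pattern == "" then ("", "contains")
  else
    let p := PySem.Str.strip pattern
    let typeMap : PySem.Dict String String :=
      PySem.Dict.mk [("starts", "starts_with"), ("contains", "contains"),
                     ("exact", "exact"), ("regex", "regex")]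
    match pvPartitionColon p.toList with
    | none => (p, "contains")                         -- sep == ''
    | some (h, r) =>
      match typeMap.get? (PySem.Str.lower (String.ofList h)) with
      | some ty => (PySem.Str.strip (String.ofList r), ty)
      | none => (p, "contains")

-- ===== PRECONDITION & SPEC =====
def Spec_parse_pattern_with_prefix (pattern : String) (out : String × String) : Prop := out = parse_pattern_with_prefix_alt pattern
instance (pattern : String) (out : String × String) : Decidable (Spec_parse_pattern_with_prefix pattern out) := by unfold Spec_parse_pattern_with_prefix; infer_instance

-- ===== CLAIM (what is proved, stated in full; the proofs are below) =====
def Claim_equal_parse_pattern_with_prefix : Prop := ∀ (pattern : String), Dom_parse_pattern_with_prefix pattern → Spec_parse_pattern_with_prefix pattern (parse_pattern_with_prefix pattern)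

-- ===== LEMMAS AND PROOFS =====

theorem pvLowerChar_eq_colon {c : Char} : PySem.Chars.lowerChar c = ':' ↔ c = ':' := by
  unfold PySem.Chars.lowerChar PySem.Chars.isupper
  split_ifs with h
  · simp only [Bool.and_eq_true, decide_eq_true_eq] at h
    have h65 : 65 ≤ c.toNat := h.1
    have h90 : c.toNat ≤ 90 := h.2
    have hv : (c.toNat + 32).isValidChar := Or.inl (by omega)
    have h3 : (Char.ofNat (c.toNat + 32)).toNat = c.toNat + 32 := by
      rw [Char.ofNat, dif_pos hv]; rfl
    constructor
    · intro hc
      have h2 : (Char.ofNat (c.toNat + 32)).toNat = 58 := by rw [hc]; rfl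
      omega
    · intro hc
      subst hc
      exact absurd h65 (by decide)
  · exact Iff.rfl

theorem pvPartition_decomp {cs h r : List Char}
    (hp : pvPartitionColon cs = some (h, r)) : cs = h ++ ':' :: r := by
  induction cs generalizing h with
  | nil => simp [pvPartitionColon] at hp
  | cons c cs ih =>
    by_cases hc : c = ':'
    · subst hc
      simp [pvPartitionColon] at hp
      obtain ⟨h1, h2⟩ := hp
      subst h1; subst h2; rfl
    · simp only [pvPartitionColon, if_neg hc] at hp
      cases hq : pvPartitionColon cs with
      | none => rw [hq] at hp; simp at hp
      | some p =>
        obtain ⟨h', r'⟩ := p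
        rw [hq] at hp
        simp at hp
        obtain ⟨h1, h2⟩ := hp
        subst h2
        rw [← h1, ih hq]; rfl

theorem pvKey (q : List Char) (hq : ':' ∉ q) (cs : List Char) :
    (q ++ [':']) <+: cs.map PySem.Chars.lowerChar ↔
      ∃ h r, pvPartitionColon cs = some (h, r) ∧ h.map PySem.Chars.lowerChar = q := by
  induction cs generalizing q with
  | nil =>
    simp only [List.map_nil, List.prefix_nil, pvPartitionColon]
    constructor
    · intro habs
      exact absurd (List.append_eq_nil_iff.mp habs).2 (by simp)
    · rintro ⟨h, r, hh, -⟩; simp at hh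
  | cons c cs ih =>
    by_cases hc : c = ':'
    · subst hc
      simp only [pvPartitionColon, List.map_cons]
      have hlc : PySem.Chars.lowerChar ':' = ':' := by decide
      cases q with
      | nil =>
        simp only [List.nil_append, hlc]
        constructor
        · intro _; exact ⟨[], cs, rfl, rfl⟩
        · intro _
          exact List.cons_prefix_cons.mpr ⟨rfl, List.nil_prefix⟩
      | cons q0 q' =>
        have hq0 : q0 ≠ ':' := fun he => hq (he ▸ List.mem_cons_self)
        simp only [List.cons_append, List.cons_prefix_cons, hlc]
        constructor
        · rintro ⟨h1, -⟩; exact absurd h1 hq0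
        · rintro ⟨h, r, hh, hmap⟩
          simp at hh
          obtain ⟨hh1, hh2⟩ := hh
          subst hh1; simp at hmap
    · simp only [pvPartitionColon, if_neg hc, List.map_cons]
      have hlc : PySem.Chars.lowerChar c ≠ ':' := fun he => hc (pvLowerChar_eq_colon.mp he)
      cases hqq : pvPartitionColon cs with
      | none =>
        constructor
        · intro hpre
          cases q with
          | nil =>
            simp only [List.nil_append, List.cons_prefix_cons] at hpre
            exact absurd hpre.1.symm hlc
          | cons q0 q' =>
            simp only [List.cons_append, List.cons_prefix_cons] at hpre
            have := (ih q' (fun hm => hq (List.mem_cons_of_mem _ hm))).mp hpre.2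
            obtain ⟨h, r, hh, -⟩ := this
            rw [hqq] at hh; simp at hh
        · rintro ⟨h, r, hh, -⟩; simp at hh
      | some p =>
        obtain ⟨h, r⟩ := p
        cases q with
        | nil =>
          simp only [List.nil_append]
          constructor
          · intro hpre
            simp only [List.cons_prefix_cons] at hpre
            exact absurd hpre.1.symm hlc
          · rintro ⟨h', r', hh, hmap⟩
            simp only [Option.some.injEq, Prod.mk.injEq] at hh
            obtain ⟨hh1, hh2⟩ := hh
            subst hh1; simp at hmap
        | cons q0 q' =>
          have hq' : ':' ∉ q' := fun hm => hq (List.mem_cons_of_mem _ hm)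
          simp only [List.cons_append, List.cons_prefix_cons]
          rw [ih q' hq']
          constructor
          · rintro ⟨h1, h', r', hh, hmap⟩
            rw [hqq] at hh
            simp only [Option.some.injEq, Prod.mk.injEq] at hh
            refine ⟨c :: h', r', by rw [hh.1, hh.2], ?_⟩
            simp [hmap, h1]
          · rintro ⟨h', r', hh, hmap⟩
            simp only [Option.some.injEq, Prod.mk.injEq] at hh
            obtain ⟨hh1, hh2⟩ := hh
            subst hh1
            simp only [List.map_cons, List.cons.injEq] at hmap
            exact ⟨hmap.1.symm, h, r, hqq, hmap.2⟩

-- startswith on the String side, routed through pvKey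
theorem pvStarts (p pre : String) (q : List Char) (hpre : pre.toList = q ++ [':'])
    (hq : ':' ∉ q) :
    PySem.Str.startswith (PySem.Str.lower p) pre = true ↔
      ∃ h r, pvPartitionColon p.toList = some (h, r) ∧ h.map PySem.Chars.lowerChar = q := by
  rw [← pvKey q hq p.toList]
  simp [hpre, PySem.Chars.startswith, PySem.Chars.lower, List.isPrefixOf_iff_prefix]

-- ===== VERDICT (by name: the statement is the Claim_ definition above) =====
set_option maxHeartbeats 1000000 in
theorem parse_pattern_with_prefix_spec : Claim_equal_parse_pattern_with_prefix := by
  intro pattern _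
  unfold Spec_parse_pattern_with_prefix parse_pattern_with_prefix parse_pattern_with_prefix_alt
  by_cases hemp : pattern == ""
  · simp [hemp]
  · simp only [Bool.not_eq_true] at hemp
    rw [if_neg (by simp_all), if_neg (by simp_all)]
    set p := PySem.Str.strip pattern with hp
    cases hpart : pvPartitionColon p.toList with
    | none =>
      have noq : ∀ (pre : String) (q : List Char), pre.toList = q ++ [':'] → ':' ∉ q →
          PySem.Str.startswith (PySem.Str.lower p) pre = false := by
        intro pre q hpre hq
        rw [Bool.eq_false_iff, Ne, pvStarts p pre q hpre hq]
        rintro ⟨h, r, hh, -⟩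
        rw [hpart] at hh; simp at hh
      simp only [pvPrefixLoopA, hpart]
      rw [noq "starts:" "starts".toList (by decide) (by decide),
          noq "contains:" "contains".toList (by decide) (by decide),
          noq "exact:" "exact".toList (by decide) (by decide),
          noq "regex:" "regex".toList (by decide) (by decide)]
      simp
    | some pr =>
      obtain ⟨h, r⟩ := pr
      have hdec := pvPartition_decomp hpart
      -- the sliced tail of A equals B's rest
      have hslice : ∀ n : Nat, n = h.length + 1 →
          PySem.Str.strip (PySem.Str.slice p (some (n : Int)) none)
            = PySem.Str.strip (String.ofList r) := by
        intro n hn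
        apply String.toList_inj.mp
        simp only [PySem.Str.toList_strip]
        congr 1
        have h1 : (PySem.Str.slice p (some (n : Int)) none).toList
            = List.drop n p.toList := by
          rw [PySem.Str.toList_slice, PySem.Chars.slice_eq_listSlice,
              PySem.List.slice_from _ (by positivity)]
          simp
        rw [h1, hdec, String.toList_ofList,
            show h ++ ':' :: r = (h ++ [':']) ++ r by simp, hn,
            show h.length + 1 = (h ++ [':']).length by simp, List.drop_left]
      have hmatch : ∀ (pre : String) (q : List Char), pre.toList = q ++ [':'] → ':' ∉ q →
          (PySem.Str.startswith (PySem.Str.lower p) pre = true ↔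
            h.map PySem.Chars.lowerChar = q) := by
        intro pre q hpre hq
        rw [pvStarts p pre q hpre hq]
        constructor
        · rintro ⟨h', r', hh, hmap⟩
          rw [hpart] at hh
          simp only [Option.some.injEq, Prod.mk.injEq] at hh
          rw [hh.1]; exact hmap
        · intro hmap; exact ⟨h, r, hpart, hmap⟩
      have hlow : (PySem.Str.lower (String.ofList h)).toList = h.map PySem.Chars.lowerChar := by
        simp [PySem.Chars.lower]
      simp only [pvPrefixLoopA, hpart]
      by_cases h1 : h.map PySem.Chars.lowerChar = "starts".toList
      · rw [if_pos ((hmatch "starts:" "starts".toList (by decide) (by decide)).mpr h1)]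
        have hl6 : h.length = 6 := by
          have := congrArg List.length h1; simpa using this
        have hkey : PySem.Str.lower (String.ofList h) = "starts" :=
          String.toList_inj.mp (by rw [hlow, h1])
        rw [hkey, show (PySem.Str.len "starts:") = ((7 : Nat) : Int) from by decide,
            hslice 7 (by omega)]
        rfl
      · rw [if_neg (by rw [Bool.not_eq_true, Bool.eq_false_iff, Ne,
              hmatch "starts:" "starts".toList (by decide) (by decide)]; exact h1)]
        by_cases h2 : h.map PySem.Chars.lowerChar = "contains".toList
        · rw [if_pos ((hmatch "contains:" "contains".toList (by decide) (by decide)).mpr h2)]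
          have hl8 : h.length = 8 := by
            have := congrArg List.length h2; simpa using this
          have hkey : PySem.Str.lower (String.ofList h) = "contains" :=
            String.toList_inj.mp (by rw [hlow, h2])
          rw [hkey, show (PySem.Str.len "contains:") = ((9 : Nat) : Int) from by decide,
              hslice 9 (by omega)]
          rfl
        · rw [if_neg (by rw [Bool.not_eq_true, Bool.eq_false_iff, Ne,
                hmatch "contains:" "contains".toList (by decide) (by decide)]; exact h2)]
          by_cases h3 : h.map PySem.Chars.lowerChar = "exact".toList
          · rw [if_pos ((hmatch "exact:" "exact".toList (by decide) (by decide)).mpr h3)]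
            have hl5 : h.length = 5 := by
              have := congrArg List.length h3; simpa using this
            have hkey : PySem.Str.lower (String.ofList h) = "exact" :=
              String.toList_inj.mp (by rw [hlow, h3])
            rw [hkey, show (PySem.Str.len "exact:") = ((6 : Nat) : Int) from by decide,
                hslice 6 (by omega)]
            rfl
          · rw [if_neg (by rw [Bool.not_eq_true, Bool.eq_false_iff, Ne,
                  hmatch "exact:" "exact".toList (by decide) (by decide)]; exact h3)]
            by_cases h4 : h.map PySem.Chars.lowerChar = "regex".toList
            · rw [if_pos ((hmatch "regex:" "regex".toList (by decide) (by decide)).mpr h4)]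
              have hl5 : h.length = 5 := by
                have := congrArg List.length h4; simpa using this
              have hkey : PySem.Str.lower (String.ofList h) = "regex" :=
                String.toList_inj.mp (by rw [hlow, h4])
              rw [hkey, show (PySem.Str.len "regex:") = ((6 : Nat) : Int) from by decide,
                  hslice 6 (by omega)]
              rfl
            · rw [if_neg (by rw [Bool.not_eq_true, Bool.eq_false_iff, Ne,
                    hmatch "regex:" "regex".toList (by decide) (by decide)]; exact h4)]
              have hnone : PySem.Dict.get?
                  (PySem.Dict.mk [("starts","starts_with"),("contains","contains"),
                                  ("exact","exact"),("regex","regex")])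
                  (PySem.Str.lower (String.ofList h)) = none := by
                simp only [PySem.Dict.get?, Option.map_eq_none_iff]
                rw [List.find?_eq_none]
                rintro ⟨k, v⟩ hm
                simp only [List.mem_cons, List.not_mem_nil, or_false, Prod.mk.injEq] at hm
                intro hbe
                have hk : k = PySem.Str.lower (String.ofList h) := beq_iff_eq.mp hbe
                rcases hm with ⟨hk', -⟩ | ⟨hk', -⟩ | ⟨hk', -⟩ | ⟨hk', -⟩ <;>
                  rw [hk'] at hk
                · exact h1 (by rw [← hlow, ← hk])
                · exact h2 (by rw [← hlow, ← hk])
                · exact h3 (by rw [← hlow, ← hk])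
                · exact h4 (by rw [← hlow, ← hk])
              rw [hnone]
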